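-- pv_equiv track=rewrite | github.com/ezio37337/Timetabling-Project | main.py | course_scheduled_once_violated
-- ===== SOURCE A (Python) =====
-- def course_scheduled_once_violated(timetable):
--     # Create a dictionary to store the count of each course
--     course_count = {}
--
--     # Check each slot in the timetable
--     for (room, timeslot), course in timetable['slots'].items():
--         # If the course is not in the dictionary, initialize its count to 1
--         if course not in course_count:
--             course_count[course] = 1
--         else:
--             # If the course is already in the dictionary, increment its count
--             course_count[course] += 1
--
--     # Check if any course has been scheduled more than once
--     for count in course_count.values():
--         if count > 1:
--             # If a course is scheduled more than once, return True (violated)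
--             return True
--
--     # If no violations were found, return False
--     return False
-- ===== SOURCE B (Python) =====
-- def course_scheduled_once_violated(timetable):
--     # Sort the scheduled courses: any duplicated course then occupies
--     # adjacent positions, so a single scan of neighbouring pairs suffices.
--     courses = sorted(timetable['slots'].values())
--     return any(x == y for x, y in zip(courses, courses[1:]))
-- ===== Notes on version B (the rewrite author's own statement) =====
-- stated objective: alternative
-- what changed: Replaced the hash-counting dictionary plus count>1 scan by sorting the course values and scanning adjacent pairs for an equal neighbour.
import Mathlib
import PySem

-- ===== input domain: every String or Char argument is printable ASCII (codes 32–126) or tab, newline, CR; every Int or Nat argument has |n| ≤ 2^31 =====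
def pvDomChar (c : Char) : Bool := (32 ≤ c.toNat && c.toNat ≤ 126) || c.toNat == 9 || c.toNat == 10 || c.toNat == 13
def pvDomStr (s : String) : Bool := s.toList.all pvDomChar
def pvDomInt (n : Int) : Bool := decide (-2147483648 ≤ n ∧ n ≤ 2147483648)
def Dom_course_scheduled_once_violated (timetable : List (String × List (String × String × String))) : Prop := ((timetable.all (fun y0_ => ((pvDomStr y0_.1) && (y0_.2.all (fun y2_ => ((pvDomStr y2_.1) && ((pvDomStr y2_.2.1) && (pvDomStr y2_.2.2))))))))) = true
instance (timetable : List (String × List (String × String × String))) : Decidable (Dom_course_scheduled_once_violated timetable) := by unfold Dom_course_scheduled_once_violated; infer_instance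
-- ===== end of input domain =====

-- B sorts the course values and scans adjacent pairs for an equal neighbour,
-- instead of A's counting dictionary plus count>1 scan (alternative algorithm).

-- ===== PORT A =====
-- A: count each course in a dict, then scan the counts for one > 1.
def course_scheduled_once_violated (timetable : List (String × List (String × String × String))) : Bool :=
  let slots := ((PySem.Dict.mk timetable).get? "slots").getD []
  let course_count : PySem.Dict String Int :=
    slots.foldl (fun d e =>
      if !(d.contains e.2.2) then d.insert e.2.2 1
      else d.insert e.2.2 (d.getD e.2.2 0 + 1)) PySem.Dict.empty
  course_count.values.any (fun c => c > 1)

-- ===== PORT B =====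
-- B: courses = sorted(values); any adjacent pair equal (zip with courses[1:]).
def course_scheduled_once_violated_alt (timetable : List (String × List (String × String × String))) : Bool :=
  let courses := PySem.List.sorted ((((PySem.Dict.mk timetable).get? "slots").getD []).map (fun e => e.2.2)) (fun x => x) false
  (courses.zip (PySem.List.slice courses (some 1) none)).any (fun p => p.1 == p.2)

-- ===== PRECONDITION & SPEC =====
-- Pre_ excludes exactly the inputs without a "slots" key, on which Python A raises KeyError.
def Pre_course_scheduled_once_violated (timetable : List (String × List (String × String × String))) : Prop :=
  "slots" ∈ timetable.map Prod.fst
instance (timetable : List (String × List (String × String × String))) : Decidable (Pre_course_scheduled_once_violated timetable) := by unfold Pre_course_scheduled_once_violated; infer_instance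
def pvWitness_course_scheduled_once_violated : (List (String × List (String × String × String))) :=
  [("slots", [("r1", "t1", "CS101"), ("r2", "t2", "CS101")])]
def Spec_course_scheduled_once_violated (timetable : List (String × List (String × String × String))) (out : Bool) : Prop := out = course_scheduled_once_violated_alt timetable
instance (timetable : List (String × List (String × String × String))) (out : Bool) : Decidable (Spec_course_scheduled_once_violated timetable out) := by unfold Spec_course_scheduled_once_violated; infer_instance

-- ===== CLAIM (what is proved, stated in full; the proofs are below) =====
def Claim_equal_course_scheduled_once_violated : Prop := ∀ (timetable : List (String × List (String × String × String))), Dom_course_scheduled_once_violated timetable → Pre_course_scheduled_once_violated timetable → Spec_course_scheduled_once_violated timetable (course_scheduled_once_violated timetable)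

-- ===== LEMMAS AND PROOFS =====

-- A's branchy counting fold is the insert-based counter over the course values.
lemma pv_fold_eq_counter (slots : List (String × String × String)) :
    slots.foldl (fun d e =>
      if !(d.contains e.2.2) then d.insert e.2.2 1
      else d.insert e.2.2 (d.getD e.2.2 0 + 1)) PySem.Dict.empty
      = PySem.Dict.counter (slots.map fun e => e.2.2) := by
  rw [← PySem.Dict.foldl_insert_getD_add_one_eq_counter, List.foldl_map]
  have hfun : (fun (d : PySem.Dict String Int) (e : String × String × String) =>
      if !(d.contains e.2.2) then d.insert e.2.2 1
      else d.insert e.2.2 (d.getD e.2.2 0 + 1))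
      = fun d e => d.insert e.2.2 (d.getD e.2.2 0 + 1) := by
    funext d e
    by_cases h : d.contains e.2.2
    · simp [h]
    · simp only [Bool.not_eq_true] at h
      simp [h, PySem.Dict.getD_of_not_contains d 0 h]
  rw [hfun]

-- some count exceeds 1 iff the course list has a duplicate
lemma pv_any_count_iff (cs : List String) :
    ((PySem.Dict.counter cs).values.any (fun c => c > 1)) = true ↔ ¬ cs.Nodup := by
  rw [List.nodup_iff_count_le_one]
  simp only [PySem.Dict.values, PySem.Dict.items_counter, List.map_map, List.any_eq_true,
    List.mem_map, PySem.Set.mem_ofList, not_forall, not_le]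
  constructor
  · rintro ⟨c, ⟨k, hk, rfl⟩, h⟩
    exact ⟨k, by exact_mod_cast (by simpa using h)⟩
  · rintro ⟨k, hk⟩
    refine ⟨(cs.count k : Int), ⟨k, ?_, rfl⟩, by simp; exact_mod_cast hk⟩
    exact List.count_pos_iff.mp (by omega)

-- in a ≤-sorted list, some adjacent pair is equal iff the list has a duplicate
lemma pv_adj_any_iff : ∀ (l : List String), l.Pairwise (· ≤ ·) →
    (((l.zip l.tail).any fun p => p.1 == p.2) = true ↔ ¬ l.Nodup)
  | [], _ => by simp
  | [a], _ => by simp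
  | a :: b :: t, h => by
    have h1 : (b :: t).Pairwise (· ≤ ·) := h.tail
    have ih := pv_adj_any_iff (b :: t) h1
    simp only [List.tail_cons, List.zip_cons_cons, List.any_cons, Bool.or_eq_true,
      beq_iff_eq] at ih ⊢
    by_cases hab : a = b
    · subst hab
      simp [List.nodup_cons]
    · rw [List.nodup_cons]
      constructor
      · rintro (rfl | hrest)
        · exact absurd rfl hab
        · intro ⟨_, hnd⟩; exact ih.mp hrest hnd
      · intro hnd
        right
        apply ih.mpr
        intro hnd2
        apply hnd
        refine ⟨?_, hnd2⟩
        intro hmem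
        rcases List.mem_cons.mp hmem with rfl | hmem
        · exact hab rfl
        · have hb : b ≤ a := (List.pairwise_cons.mp h1).1 a hmem
          have hA : a ≤ b := (List.pairwise_cons.mp h).1 b (by simp)
          exact hab (le_antisymm hA hb)

-- ===== VERDICT (by name: the statement is the Claim_ definition above) =====
theorem course_scheduled_once_violated_spec : Claim_equal_course_scheduled_once_violated := by
  intro tt _ _
  show course_scheduled_once_violated tt = course_scheduled_once_violated_alt tt
  simp only [course_scheduled_once_violated, course_scheduled_once_violated_alt]
  set cs := ((((PySem.Dict.mk tt).get? "slots").getD []).map fun e => e.2.2) with hcs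
  rw [pv_fold_eq_counter, PySem.List.slice_from_one, Bool.eq_iff_iff,
    pv_any_count_iff, pv_adj_any_iff _ (PySem.List.sorted_pairwise cs (fun x => x) )]
  have hp := PySem.List.sorted_perm cs (fun x => x) false
  exact not_congr hp.nodup_iff |>.symm
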